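-- pv_equiv track=rewrite | github.com/S-A-I-V/CodeForcesProblem | sortedwithadjacent.py | sorted_adjacent_differences
-- ===== SOURCE A (Python) =====
-- def sorted_adjacent_differences(n, arr):
--     arr.sort()
--     result = []
--     left, right = 0, n - 1
--     while left <= right:
--         if left == right:
--             result.append(arr[left])
--         else:
--             result.append(arr[left])
--             result.append(arr[right])
--         left += 1
--         right -= 1
--     return result[::-1]
-- ===== SOURCE B (Python) =====
-- def sorted_adjacent_differences(n, arr):
--     # sorts arr in place (same observable mutation as the original)
--     arr.sort()
--     # Direct index-permutation: output position j holds the sorted element at a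
--     # closed-form index, so no interleaving loop and no final reversal is needed.
--     out = []
--     for j in range(n):
--         t = n - 1 - j
--         if t % 2 == 0:
--             out.append(arr[t // 2])
--         else:
--             out.append(arr[n - 1 - t // 2])
--     return out
-- ===== Notes on version B (the rewrite author's own statement) =====
-- stated objective: alternative
-- what changed: Replaces A's two-pointer interleaving loop followed by a list reversal with a single forward pass that fills each output position directly from a closed-form index permutation of the sorted array (no reversal, no pair interleaving).
-- outside the precondition, e.g. on sorted_adjacent_differences(3, [5, 1]): A raises IndexError, B raises IndexError
import Mathlib
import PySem

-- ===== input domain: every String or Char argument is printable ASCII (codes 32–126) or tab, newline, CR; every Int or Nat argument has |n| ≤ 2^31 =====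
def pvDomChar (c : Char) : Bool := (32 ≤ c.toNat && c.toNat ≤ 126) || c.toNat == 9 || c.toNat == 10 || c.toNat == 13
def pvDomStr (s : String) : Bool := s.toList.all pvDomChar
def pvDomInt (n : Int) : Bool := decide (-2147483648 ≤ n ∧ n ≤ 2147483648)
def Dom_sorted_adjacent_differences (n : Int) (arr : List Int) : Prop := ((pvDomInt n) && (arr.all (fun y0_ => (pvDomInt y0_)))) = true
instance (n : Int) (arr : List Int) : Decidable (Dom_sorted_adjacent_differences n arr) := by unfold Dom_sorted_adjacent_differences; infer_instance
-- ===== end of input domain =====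

-- B replaces A's two-pointer interleave-then-reverse by a single forward pass that writes each
-- output position directly from a closed-form index into the sorted array (objective: alternative).
-- Equivalence is about the RETURN value; both A and B sort arr in place (same observable mutation).

-- ===== PORT A =====
def pvALoop (arr : List Int) (left right : Int) (result : List Int) : List Int :=
  if _h : left ≤ right then
    pvALoop arr (left + 1) (right - 1)
      (if left = right then result ++ [(PySem.List.pyGet? arr left).getD 0]
       else result ++ [(PySem.List.pyGet? arr left).getD 0, (PySem.List.pyGet? arr right).getD 0])
  else result
termination_by (right + 1 - left).toNat
decreasing_by omega

def sorted_adjacent_differences (n : Int) (arr : List Int) : List Int :=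
  -- arr.sort(); then the while loop; result[::-1] is List.reverse
  (pvALoop (PySem.List.sorted arr (fun x => x) false) 0 (n - 1) []).reverse

-- ===== PORT B =====
def sorted_adjacent_differences_alt (n : Int) (arr : List Int) : List Int :=
  let s := PySem.List.sorted arr (fun x => x) false
  (PySem.List.pyRange 0 n 1).foldl (fun out j =>
    let t := n - 1 - j
    if PySem.Int.mod t 2 = 0 then
      out ++ [(PySem.List.pyGet? s (PySem.Int.floordiv t 2)).getD 0]
    else
      out ++ [(PySem.List.pyGet? s (n - 1 - PySem.Int.floordiv t 2)).getD 0]) []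

-- ===== PRECONDITION & SPEC =====
-- Pre_ excludes exactly the inputs where Python A raises IndexError: n larger than len(arr).
def Pre_sorted_adjacent_differences (n : Int) (arr : List Int) : Prop := n ≤ (arr.length : Int)
instance (n : Int) (arr : List Int) : Decidable (Pre_sorted_adjacent_differences n arr) := by unfold Pre_sorted_adjacent_differences; infer_instance
def pvWitness_sorted_adjacent_differences : Int × List Int := (5, [3, 1, 4, 1, 5])

def Spec_sorted_adjacent_differences (n : Int) (arr : List Int) (out : List Int) : Prop := out = sorted_adjacent_differences_alt n arr
instance (n : Int) (arr : List Int) (out : List Int) : Decidable (Spec_sorted_adjacent_differences n arr out) := by unfold Spec_sorted_adjacent_differences; infer_instance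

-- ===== CLAIM (what is proved, stated in full; the proofs are below) =====
def Claim_equal_sorted_adjacent_differences : Prop := ∀ (n : Int) (arr : List Int), Dom_sorted_adjacent_differences n arr → Pre_sorted_adjacent_differences n arr → Spec_sorted_adjacent_differences n arr (sorted_adjacent_differences n arr)

-- ===== LEMMAS AND PROOFS =====

-- The closed-form pick, over Nat output positions (proof-side mirror of B's loop body).
def pvPick (s : List Int) (n : Int) (j : Nat) : Int :=
  let t := n - 1 - (j : Int)
  if t % 2 = 0 then s.getD (t / 2).toNat 0 else s.getD (n - 1 - t / 2).toNat 0

lemma pvALoop_acc (arr : List Int) (l r : Int) (acc : List Int) :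
    pvALoop arr l r acc = acc ++ pvALoop arr l r [] := by
  conv_lhs => rw [pvALoop]
  conv_rhs => rw [pvALoop]
  by_cases h : l ≤ r
  · rw [dif_pos h, dif_pos h]
    by_cases he : l = r
    · rw [if_pos he, if_pos he,
        pvALoop_acc arr (l+1) (r-1) (acc ++ _), pvALoop_acc arr (l+1) (r-1) ([] ++ _)]
      simp
    · rw [if_neg he, if_neg he,
        pvALoop_acc arr (l+1) (r-1) (acc ++ _), pvALoop_acc arr (l+1) (r-1) ([] ++ _)]
      simp
  · rw [dif_neg h, dif_neg h]; simp
termination_by (r + 1 - l).toNat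
decreasing_by all_goals omega

-- Reverse of A's loop output, characterised as a direct index-permutation map.
lemma pvALoop_reverse_eq (s : List Int) (n l r : Int)
    (hl : 0 ≤ l) (hinv : l + r = n - 1) (hr : r < (s.length : Int)) :
    (pvALoop s l r []).reverse = (List.range (r + 1 - l).toNat).map (pvPick s n) := by
  conv_lhs => rw [pvALoop]
  by_cases h : l ≤ r
  · rw [dif_pos h]
    have hls : l.toNat < s.length := by omega
    have hxl : (PySem.List.pyGet? s l).getD 0 = s.getD l.toNat 0 := by
      rw [PySem.List.pyGet?_eq_some_getElem (xs := s) hl (by omega),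
        List.getD_eq_getElem s 0 hls]
      rfl
    by_cases he : l = r
    · rw [if_pos he, pvALoop_acc]
      have hbase : pvALoop s (l+1) (r-1) [] = [] := by
        rw [pvALoop, dif_neg (by omega)]
      rw [hbase, hxl]
      have h1 : (r + 1 - l).toNat = 1 := by omega
      rw [h1]
      simp only [List.range_one, List.map_cons, List.map_nil, List.append_nil,
        List.reverse_cons, List.reverse_nil, List.nil_append]
      unfold pvPick
      have ht : n - 1 - ((0:Nat):Int) = 2 * l := by push_cast; omega
      rw [ht, if_pos (by omega), show (2 * l) / 2 = l from by omega]
    · rw [if_neg he, pvALoop_acc]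
      have hlr : l < r := by omega
      have hrs : r.toNat < s.length := by omega
      have hxr : (PySem.List.pyGet? s r).getD 0 = s.getD r.toNat 0 := by
        rw [PySem.List.pyGet?_eq_some_getElem (xs := s) (by omega) hr,
          List.getD_eq_getElem s 0 hrs]
        rfl
      rw [hxl, hxr, List.reverse_append,
        pvALoop_reverse_eq s n (l+1) (r-1) (by omega) (by omega) (by omega)]
      have hk : (r + 1 - l).toNat = (r - 1 + 1 - (l + 1)).toNat + 1 + 1 := by omega
      rw [hk, List.range_succ, List.range_succ]
      simp only [List.map_append, List.map_cons, List.map_nil, List.append_assoc]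
      congr 1
      have hp1 : pvPick s n ((r - 1 + 1 - (l + 1)).toNat) = s.getD r.toNat 0 := by
        unfold pvPick
        have ht : n - 1 - (((r - 1 + 1 - (l + 1)).toNat : Nat) : Int) = 2 * l + 1 := by omega
        rw [ht, if_neg (by omega)]
        congr 1
        omega
      have hp2 : pvPick s n ((r - 1 + 1 - (l + 1)).toNat + 1) = s.getD l.toNat 0 := by
        unfold pvPick
        have ht : n - 1 - (((r - 1 + 1 - (l + 1)).toNat + 1 : Nat) : Int) = 2 * l := by
          push_cast; omega
        rw [ht, if_pos (by omega)]
        congr 1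
        omega
      rw [hp1, hp2]
      simp
  · rw [dif_neg h]
    rw [show (r + 1 - l).toNat = 0 from by omega]
    simp
termination_by (r + 1 - l).toNat
decreasing_by omega

-- ===== VERDICT (by name: the statement is the Claim_ definition above) =====
theorem sorted_adjacent_differences_spec : Claim_equal_sorted_adjacent_differences := by
  intro n arr _ hPre
  unfold Pre_sorted_adjacent_differences at hPre
  unfold Spec_sorted_adjacent_differences
  unfold sorted_adjacent_differences sorted_adjacent_differences_alt
  set s := PySem.List.sorted arr (fun x => x) false with hs
  have hlen : s.length = arr.length := PySem.List.length_sorted arr _ _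
  dsimp only
  have hfun : (fun (out : List Int) (j : Int) =>
      if PySem.Int.mod (n - 1 - j) 2 = 0 then
        out ++ [(PySem.List.pyGet? s (PySem.Int.floordiv (n - 1 - j) 2)).getD 0]
      else out ++ [(PySem.List.pyGet? s (n - 1 - PySem.Int.floordiv (n - 1 - j) 2)).getD 0])
      = (fun out j => out ++
        [if PySem.Int.mod (n - 1 - j) 2 = 0 then
            (PySem.List.pyGet? s (PySem.Int.floordiv (n - 1 - j) 2)).getD 0
          else (PySem.List.pyGet? s (n - 1 - PySem.Int.floordiv (n - 1 - j) 2)).getD 0]) := by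
    funext out j
    split_ifs <;> rfl
  rw [hfun, PySem.List.foldl_append_singleton_eq_map, List.nil_append]
  by_cases hn : n ≤ 0
  · rw [pvALoop, dif_neg (by omega), PySem.List.pyRange_one_eq_nil (by omega)]
    simp
  · rw [pvALoop_reverse_eq s n 0 (n - 1) le_rfl (by omega) (by omega),
      show n - 1 + 1 - 0 = n from by omega,
      PySem.List.pyRange_one, List.map_map, show n - (0:Int) = n from by ring]
    apply List.map_congr_left
    intro j hj
    have hjn : (j : Int) < n := by
      have := List.mem_range.mp hj
      omega
    have hj0 : (0:Int) ≤ (j : Int) := by positivity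
    have ht0 : (0:Int) ≤ n - 1 - (j : Int) := by omega
    simp only [Function.comp_apply, zero_add]
    unfold pvPick
    rw [PySem.Int.mod_eq_emod_of_pos (by norm_num),
      PySem.Int.floordiv_eq_ediv_of_pos (by norm_num)]
    set t := n - 1 - (j : Int) with hts
    have htn : t < n := by omega
    have hd2 : 0 ≤ t / 2 ∧ t / 2 < n := by omega
    have hd3 : 0 ≤ n - 1 - t / 2 ∧ n - 1 - t / 2 < n := by omega
    by_cases hm : t % 2 = 0
    · rw [if_pos hm, if_pos hm,
        PySem.List.pyGet?_eq_some_getElem (xs := s) hd2.1 (by omega),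
        List.getD_eq_getElem s 0 (by omega)]
      rfl
    · rw [if_neg hm, if_neg hm,
        PySem.List.pyGet?_eq_some_getElem (xs := s) hd3.1 (by omega),
        List.getD_eq_getElem s 0 (by omega)]
      rfl
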